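-- pv_equiv track=rewrite | github.com/sanakausar356/testgenie-epicroast-new | groomroom/core_no_scoring.py | replace_banned_phrases
-- ===== SOURCE A (Python) =====
-- from typing import Optional, Dict, List, Any, Tuple, Union
--
-- def replace_banned_phrases(ac: str, domain_terms: List[str]) -> str:
--     """Replace banned generic phrases with specific requirements"""
--     ac = ac or ''
--     enhanced = ac
--
--     replacements = {
--         "valid input": "input that passes validation rules",
--         "gracefully": "with appropriate error handling",
--         "meets requirements": "satisfies the specified acceptance criteria",
--         "works as expected": "functions according to the defined behavior"
--     }
--
--     for banned, replacement in replacements.items():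
--         enhanced = enhanced.replace(banned, replacement)
--
--     return enhanced
-- ===== SOURCE B (Python) =====
-- from typing import List
--
-- def replace_banned_phrases(ac: str, domain_terms: List[str]) -> str:
--     """Replace banned generic phrases with specific requirements.
--
--     Single left-to-right scan: at each position try the banned phrases in
--     order; on a match emit the replacement and jump past the phrase,
--     otherwise emit the character.  (Equivalent to A's four sequential
--     .replace passes because no replacement text contains or overlaps a
--     banned phrase and the banned phrases do not overlap each other.)
--     """
--     ac = ac or ''
--
--     replacements = {
--         "valid input": "input that passes validation rules",
--         "gracefully": "with appropriate error handling",
--         "meets requirements": "satisfies the specified acceptance criteria",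
--         "works as expected": "functions according to the defined behavior"
--     }
--
--     out = []
--     i = 0
--     n = len(ac)
--     while i < n:
--         for banned, replacement in replacements.items():
--             if ac.startswith(banned, i):
--                 out.append(replacement)
--                 i += len(banned)
--                 break
--         else:
--             out.append(ac[i])
--             i += 1
--     return ''.join(out)
-- ===== Notes on version B (the rewrite author's own statement) =====
-- stated objective: alternative
-- what changed: B replaces A's four sequential full-string .replace passes with a single left-to-right scan that tries each banned phrase at every position and emits either the replacement or the character, joining the pieces once.
import Mathlib
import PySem

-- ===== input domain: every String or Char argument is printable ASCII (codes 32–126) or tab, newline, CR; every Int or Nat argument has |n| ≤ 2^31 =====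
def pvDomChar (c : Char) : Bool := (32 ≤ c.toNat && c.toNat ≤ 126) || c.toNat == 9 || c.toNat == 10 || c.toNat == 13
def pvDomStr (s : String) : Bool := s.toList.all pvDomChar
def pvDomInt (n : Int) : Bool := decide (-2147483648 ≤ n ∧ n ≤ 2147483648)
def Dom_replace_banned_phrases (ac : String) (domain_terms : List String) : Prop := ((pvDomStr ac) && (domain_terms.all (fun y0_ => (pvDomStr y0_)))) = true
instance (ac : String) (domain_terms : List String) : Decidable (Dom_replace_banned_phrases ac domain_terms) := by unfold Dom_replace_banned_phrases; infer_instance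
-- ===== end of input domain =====

-- B replaces A's four sequential full-string .replace passes by one left-to-right scan
-- that tries the four banned phrases at each position (objective: alternative algorithm).

-- ===== PORT A =====
-- A: ac = ac or '' (identity for strings up to ''), then four sequential replaces in dict order.
def replace_banned_phrases (ac : String) (domain_terms : List String) : String :=
  let ac := if ac = "" then "" else ac
  let enhanced := ac
  let enhanced := PySem.Str.replace enhanced "valid input" "input that passes validation rules"
  let enhanced := PySem.Str.replace enhanced "gracefully" "with appropriate error handling"
  let enhanced := PySem.Str.replace enhanced "meets requirements" "satisfies the specified acceptance criteria"
  let enhanced := PySem.Str.replace enhanced "works as expected" "functions according to the defined behavior"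
  enhanced

-- ===== PORT B =====
-- the four banned phrases and their replacements, in dict order
def pvK1 : List Char := "valid input".toList
def pvR1 : List Char := "input that passes validation rules".toList
def pvK2 : List Char := "gracefully".toList
def pvR2 : List Char := "with appropriate error handling".toList
def pvK3 : List Char := "meets requirements".toList
def pvR3 : List Char := "satisfies the specified acceptance criteria".toList
def pvK4 : List Char := "works as expected".toList
def pvR4 : List Char := "functions according to the defined behavior".toList

-- Source B's while loop over position i, here the remaining suffix: at each position try the
-- phrases in order; on a match append the replacement and jump past the phrase, else append
-- the character; the pieces joined at the end in Source B appear here concatenated in order.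
def pvScan : List Char → List Char
  | [] => []
  | c :: t =>
    if pvK1.isPrefixOf (c :: t) then pvR1 ++ pvScan (List.drop pvK1.length (c :: t))
    else if pvK2.isPrefixOf (c :: t) then pvR2 ++ pvScan (List.drop pvK2.length (c :: t))
    else if pvK3.isPrefixOf (c :: t) then pvR3 ++ pvScan (List.drop pvK3.length (c :: t))
    else if pvK4.isPrefixOf (c :: t) then pvR4 ++ pvScan (List.drop pvK4.length (c :: t))
    else c :: pvScan t
termination_by l => l.length
decreasing_by all_goals simp [pvK1, pvK2, pvK3, pvK4]

def replace_banned_phrases_alt (ac : String) (domain_terms : List String) : String :=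
  let ac := if ac = "" then "" else ac
  String.ofList (pvScan ac.toList)

-- ===== PRECONDITION & SPEC =====
def Spec_replace_banned_phrases (ac : String) (domain_terms : List String) (out : String) : Prop := out = replace_banned_phrases_alt ac domain_terms
instance (ac : String) (domain_terms : List String) (out : String) : Decidable (Spec_replace_banned_phrases ac domain_terms out) := by unfold Spec_replace_banned_phrases; infer_instance

-- ===== CLAIM (what is proved, stated in full; the proofs are below) =====
def Claim_equal_replace_banned_phrases : Prop := ∀ (ac : String) (domain_terms : List String), Dom_replace_banned_phrases ac domain_terms → Spec_replace_banned_phrases ac domain_terms (replace_banned_phrases ac domain_terms)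

-- ===== LEMMAS AND PROOFS =====

def pvRep (old new : List Char) : List Char → List Char
  | [] => []
  | c :: t =>
    if old.isPrefixOf (c :: t) && !old.isEmpty then new ++ pvRep old new (List.drop old.length (c :: t))
    else c :: pvRep old new t
termination_by l => l.length
decreasing_by
  · rename_i h
    simp only [Bool.and_eq_true, Bool.not_eq_true', List.isEmpty_eq_false_iff] at h
    have := List.length_pos_of_ne_nil h.2
    simp; omega
  · simp

theorem pvRep_cons (old new : List Char) (c : Char) (t : List Char)
    (h : old.isPrefixOf (c :: t) = false) : pvRep old new (c :: t) = c :: pvRep old new t := by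
  rw [pvRep]; simp [h]

theorem pvRep_match (old new u : List Char) (h : old ≠ []) :
    pvRep old new (old ++ u) = new ++ pvRep old new u := by
  cases old with
  | nil => exact absurd rfl h
  | cons o ot =>
    rw [List.cons_append, pvRep]
    simp [List.isPrefixOf_iff_prefix, List.prefix_append, List.drop_left']

-- bridge to PySem
theorem pvGo_eq (old new : List Char) (hold : old ≠ []) :
    ∀ (fuel : ℕ) (l acc : List Char), l.length ≤ fuel →
      PySem.Chars.replace.go old new fuel l acc = acc.reverse ++ pvRep old new l := by
  intro fuel
  induction fuel with
  | zero =>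
    intro l acc h
    have hl : l = [] := by cases l <;> simp_all
    subst hl
    rw [PySem.Chars.replace.go.eq_def]
    simp [pvRep]
  | succ n ih =>
    intro l acc h
    cases l with
    | nil => rw [PySem.Chars.replace.go.eq_def]; simp [pvRep]
    | cons c t =>
      rw [PySem.Chars.replace.go.eq_def]
      simp only []
      by_cases hp : old.isPrefixOf (c :: t) = true
      · rw [if_pos hp, ih _ _ (by
          have := List.length_pos_of_ne_nil hold
          simp at h ⊢; omega)]
        rw [pvRep]
        simp [hp, hold]
      · rw [if_neg hp, ih t _ (by simp at h; omega)]
        rw [pvRep_cons _ _ _ _ (Bool.eq_false_iff.mpr hp)]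
        simp
theorem pvReplace_eq (s old new : List Char) (h : old ≠ []) :
    PySem.Chars.replace s old new = pvRep old new s := by
  rw [PySem.Chars.replace]
  rw [if_neg (by simpa using h)]
  simpa using pvGo_eq old new h s.length s [] le_rfl

def pvIncomp (a k : List Char) : Bool :=
  a.tails.all (fun t => t.isEmpty || (!(k.isPrefixOf t) && !(t.isPrefixOf k)))

theorem pvIncomp_tail {c : Char} {a k : List Char} (h : pvIncomp (c :: a) k = true) :
    pvIncomp a k = true := by
  simp only [pvIncomp, List.tails_cons, List.all_cons, Bool.and_eq_true] at h
  exact h.2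

theorem pvIncomp_self {a k : List Char} (h : pvIncomp a k = true) (ha : a ≠ []) :
    ¬ k <+: a ∧ ¬ a <+: k := by
  simp only [pvIncomp, List.all_eq_true] at h
  have := h a ((List.mem_tails _ _).mpr (List.suffix_refl a))
  rw [List.isEmpty_eq_false_iff.mpr ha] at this
  simp only [Bool.false_or, Bool.and_eq_true, Bool.not_eq_true', Bool.eq_false_iff, ne_eq,
    List.isPrefixOf_iff_prefix] at this
  exact this

theorem pvNotPrefixAppend {k a u : List Char} (h1 : ¬ k <+: a) (h2 : ¬ a <+: k) :
    ¬ k <+: a ++ u := by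
  intro h
  rcases List.prefix_or_prefix_of_prefix h (List.prefix_append a u) with h' | h'
  · exact h1 h'
  · exact h2 h'

-- L1: a pass-through segment
theorem pvRep_append (old new a t : List Char) (h : pvIncomp a old = true) :
    pvRep old new (a ++ t) = a ++ pvRep old new t := by
  induction a with
  | nil => simp
  | cons c a ih =>
    have hself := pvIncomp_self h (by simp)
    have hnp : ¬ old <+: (c :: a) ++ t := pvNotPrefixAppend hself.1 hself.2
    rw [List.cons_append, pvRep_cons _ _ _ _ (Bool.eq_false_iff.mpr (fun hb =>
      hnp (by simpa [List.isPrefixOf_iff_prefix] using hb)))]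
    rw [ih (pvIncomp_tail h)]
    simp

-- L2: rep never creates a new occurrence of p at the front
theorem pvRep_not_prefix (old new : List Char) :
    ∀ (t p : List Char), pvIncomp p new = true → p ≠ [] → ¬ p <+: t → ¬ p <+: pvRep old new t := by
  intro t
  induction t with
  | nil =>
    intro p _ hp hnt h
    simp only [pvRep] at h
    exact hp (List.prefix_nil.mp h)
  | cons c t ih =>
    intro p hinc hp hnt hcontra
    by_cases hb : (old.isPrefixOf (c :: t) && !old.isEmpty) = true
    · rw [pvRep, if_pos hb] at hcontra
      have hself := pvIncomp_self hinc hp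
      exact pvNotPrefixAppend hself.2 hself.1 hcontra
    · rw [pvRep, if_neg hb] at hcontra
      cases p with
      | nil => exact hp rfl
      | cons d p' =>
        rw [List.cons_prefix_cons] at hcontra
        obtain ⟨hd, hpre⟩ := hcontra
        subst hd
        cases p' with
        | nil => exact hnt (by simp)
        | cons e p'' =>
          have hnt' : ¬ (e :: p'') <+: t := fun hh => hnt (by simp [List.cons_prefix_cons, hh])
          exact ih (e :: p'') (pvIncomp_tail hinc) (by simp) hnt' hpre

-- wrapper: ¬ k <+: c :: t  →  ¬ k <+: c :: pvRep old new t
theorem pvRep_not_prefix_cons (old new k : List Char) (c : Char) (t : List Char)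
    (hinc : pvIncomp k.tail new = true) (hnt : ¬ k <+: c :: t) :
    ¬ k <+: c :: pvRep old new t := by
  intro h
  cases k with
  | nil => exact hnt (by simp)
  | cons d k' =>
    rw [List.cons_prefix_cons] at h
    obtain ⟨hd, hpre⟩ := h
    subst hd
    cases k' with
    | nil => exact hnt (by simp)
    | cons e k'' =>
      have hnt' : ¬ (e :: k'') <+: t := fun hh => hnt (by simp [List.cons_prefix_cons, hh])
      exact pvRep_not_prefix old new t (e :: k'') (by simpa using hinc) (by simp) hnt' hpre


theorem pvT1 : pvIncomp pvR1 pvK2 = true ∧ pvIncomp pvR1 pvK3 = true ∧ pvIncomp pvR1 pvK4 = true ∧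
    pvIncomp pvK2 pvK1 = true ∧ pvIncomp pvR2 pvK3 = true ∧ pvIncomp pvR2 pvK4 = true ∧
    pvIncomp pvK3 pvK1 = true ∧ pvIncomp pvK3 pvK2 = true ∧ pvIncomp pvR3 pvK4 = true ∧
    pvIncomp pvK4 pvK1 = true ∧ pvIncomp pvK4 pvK2 = true ∧ pvIncomp pvK4 pvK3 = true := by decide

theorem pvT2 : pvIncomp pvK2.tail pvR1 = true ∧ pvIncomp pvK3.tail pvR1 = true ∧
    pvIncomp pvK3.tail pvR2 = true ∧ pvIncomp pvK4.tail pvR1 = true ∧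
    pvIncomp pvK4.tail pvR2 = true ∧ pvIncomp pvK4.tail pvR3 = true := by decide

theorem pvScan_eq_aux : ∀ (n : ℕ) (s : List Char), s.length ≤ n →
    pvScan s = pvRep pvK4 pvR4 (pvRep pvK3 pvR3 (pvRep pvK2 pvR2 (pvRep pvK1 pvR1 s))) := by
  intro n
  induction n with
  | zero =>
    intro s hs
    have : s = [] := by cases s <;> simp_all
    subst this
    simp [pvScan, pvRep]
  | succ n ih =>
    intro s hs
    cases s with
    | nil => simp [pvScan, pvRep]
    | cons c t =>
      have toF : ∀ {k l : List Char}, ¬ k <+: l → k.isPrefixOf l = false := fun h =>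
        Bool.eq_false_iff.mpr (fun hb => h (List.isPrefixOf_iff_prefix.mp hb))
      have hlen : t.length + 1 ≤ n + 1 := by simpa using hs
      by_cases h1 : pvK1 <+: (c :: t)
      · obtain ⟨u, hu⟩ := h1
        have hul : u.length ≤ n := by
          have := congrArg List.length hu
          have h11 : pvK1.length = 11 := by decide
          simp [h11] at this; omega
        rw [pvScan, if_pos (List.isPrefixOf_iff_prefix.mpr ⟨u, hu⟩)]
        rw [show List.drop pvK1.length (c :: t) = u from by rw [← hu, List.drop_left]]
        rw [show pvRep pvK1 pvR1 (c :: t) = pvR1 ++ pvRep pvK1 pvR1 u from by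
          rw [← hu]; exact pvRep_match _ _ _ (by decide)]
        rw [pvRep_append _ _ _ _ pvT1.1, pvRep_append _ _ _ _ pvT1.2.1,
          pvRep_append _ _ _ _ pvT1.2.2.1, ih u hul]
      · by_cases h2 : pvK2 <+: (c :: t)
        · obtain ⟨u, hu⟩ := h2
          have hul : u.length ≤ n := by
            have := congrArg List.length hu
            have h21 : pvK2.length = 10 := by decide
            simp [h21] at this; omega
          rw [pvScan, if_neg (by simpa [List.isPrefixOf_iff_prefix] using h1),
            if_pos (List.isPrefixOf_iff_prefix.mpr ⟨u, hu⟩)]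
          rw [show List.drop pvK2.length (c :: t) = u from by rw [← hu, List.drop_left]]
          rw [show pvRep pvK1 pvR1 (c :: t) = pvK2 ++ pvRep pvK1 pvR1 u from by
            rw [← hu]; exact pvRep_append _ _ _ _ pvT1.2.2.2.1]
          rw [pvRep_match _ _ _ (by decide), pvRep_append _ _ _ _ pvT1.2.2.2.2.1,
            pvRep_append _ _ _ _ pvT1.2.2.2.2.2.1, ih u hul]
        · by_cases h3 : pvK3 <+: (c :: t)
          · obtain ⟨u, hu⟩ := h3
            have hul : u.length ≤ n := by
              have := congrArg List.length hu
              have h31 : pvK3.length = 18 := by decide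
              simp [h31] at this; omega
            rw [pvScan, if_neg (by simpa [List.isPrefixOf_iff_prefix] using h1),
              if_neg (by simpa [List.isPrefixOf_iff_prefix] using h2),
              if_pos (List.isPrefixOf_iff_prefix.mpr ⟨u, hu⟩)]
            rw [show List.drop pvK3.length (c :: t) = u from by rw [← hu, List.drop_left]]
            rw [show pvRep pvK1 pvR1 (c :: t) = pvK3 ++ pvRep pvK1 pvR1 u from by
              rw [← hu]; exact pvRep_append _ _ _ _ pvT1.2.2.2.2.2.2.1]
            rw [pvRep_append _ _ _ _ pvT1.2.2.2.2.2.2.2.1,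
              pvRep_match _ _ _ (by decide), pvRep_append _ _ _ _ pvT1.2.2.2.2.2.2.2.2.1, ih u hul]
          · by_cases h4 : pvK4 <+: (c :: t)
            · obtain ⟨u, hu⟩ := h4
              have hul : u.length ≤ n := by
                have := congrArg List.length hu
                have h41 : pvK4.length = 17 := by decide
                simp [h41] at this; omega
              rw [pvScan, if_neg (by simpa [List.isPrefixOf_iff_prefix] using h1),
                if_neg (by simpa [List.isPrefixOf_iff_prefix] using h2),
                if_neg (by simpa [List.isPrefixOf_iff_prefix] using h3),
                if_pos (List.isPrefixOf_iff_prefix.mpr ⟨u, hu⟩)]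
              rw [show List.drop pvK4.length (c :: t) = u from by rw [← hu, List.drop_left]]
              rw [show pvRep pvK1 pvR1 (c :: t) = pvK4 ++ pvRep pvK1 pvR1 u from by
                rw [← hu]; exact pvRep_append _ _ _ _ pvT1.2.2.2.2.2.2.2.2.2.1]
              rw [pvRep_append _ _ _ _ pvT1.2.2.2.2.2.2.2.2.2.2.1,
                pvRep_append _ _ _ _ pvT1.2.2.2.2.2.2.2.2.2.2.2,
                pvRep_match _ _ _ (by decide), ih u hul]
            · have hb1 := toF h1
              have hb2 := toF h2
              have hb3 := toF h3
              have hb4 := toF h4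
              have n2 := pvRep_not_prefix_cons pvK1 pvR1 pvK2 c t pvT2.1 h2
              have n3a := pvRep_not_prefix_cons pvK1 pvR1 pvK3 c t pvT2.2.1 h3
              have n3 := pvRep_not_prefix_cons pvK2 pvR2 pvK3 c _ pvT2.2.2.1 n3a
              have n4a := pvRep_not_prefix_cons pvK1 pvR1 pvK4 c t pvT2.2.2.2.1 h4
              have n4b := pvRep_not_prefix_cons pvK2 pvR2 pvK4 c _ pvT2.2.2.2.2.1 n4a
              have n4 := pvRep_not_prefix_cons pvK3 pvR3 pvK4 c _ pvT2.2.2.2.2.2 n4b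
              rw [pvScan, if_neg (by simp [hb1]), if_neg (by simp [hb2]),
                if_neg (by simp [hb3]), if_neg (by simp [hb4])]
              rw [pvRep_cons _ _ _ _ hb1, pvRep_cons _ _ _ _ (toF n2),
                pvRep_cons _ _ _ _ (toF n3), pvRep_cons _ _ _ _ (toF n4),
                ih t (by omega)]

theorem pvScan_eq (s : List Char) :
    pvScan s = pvRep pvK4 pvR4 (pvRep pvK3 pvR3 (pvRep pvK2 pvR2 (pvRep pvK1 pvR1 s))) :=
  pvScan_eq_aux s.length s le_rfl

-- ===== VERDICT (by name: the statement is the Claim_ definition above) =====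
theorem replace_banned_phrases_spec : Claim_equal_replace_banned_phrases := by
  intro ac domain_terms _
  unfold Spec_replace_banned_phrases replace_banned_phrases replace_banned_phrases_alt
  have hid : (if ac = "" then "" else ac) = ac := by split <;> simp_all
  rw [hid]
  have hchain : (PySem.Str.replace (PySem.Str.replace (PySem.Str.replace (PySem.Str.replace ac
      "valid input" "input that passes validation rules")
      "gracefully" "with appropriate error handling")
      "meets requirements" "satisfies the specified acceptance criteria")
      "works as expected" "functions according to the defined behavior").toList = pvScan ac.toList := by
    simp only [PySem.Str.toList_replace]
    rw [pvReplace_eq _ _ _ (by decide), pvReplace_eq _ _ _ (by decide),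
      pvReplace_eq _ _ _ (by decide), pvReplace_eq _ _ _ (by decide)]
    exact (pvScan_eq ac.toList).symm
  have hgoal : PySem.Str.replace (PySem.Str.replace (PySem.Str.replace (PySem.Str.replace ac
      "valid input" "input that passes validation rules")
      "gracefully" "with appropriate error handling")
      "meets requirements" "satisfies the specified acceptance criteria")
      "works as expected" "functions according to the defined behavior" = String.ofList (pvScan ac.toList) := by
    rw [← hchain, String.ofList_toList]
  exact hgoal
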